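-- pv_equiv track=rewrite | github.com/invana/invana-engine | invana_engine2/invana/backends/janusgraph/utils.py | process_graph_schema_string
-- ===== SOURCE A (Python) =====
-- def extract_data_type(_type):
--     # TODO - fix this for different backends later
--     _d = _type.split("|")[2].strip()
--     if "class java.lang" in _d:
--         return _d.replace("class java.lang.", "")
--     return _d.split(".")[-1]
--
-- def process_graph_schema_string(schema_string):
--     schema = {
--         "vertex_labels": {},
--         "edge_labels": {},
--         "property_keys": {},
--     }
--     if schema_string is None:
--         return schema
--     data_type = None
--     __count = 0  # {2: vertex labels, 4: edge labels , 6: property names,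
--     for line in schema_string.split("\n"):
--         if line.startswith("-------"):
--             __count += 1
--             continue
--         if data_type == "vertices" and __count == 2:
--             schema['vertex_labels'][line.split("|")[0].strip()] = {
--                 "name": line.split("|")[0].strip(),
--                 "partitioned": line.split("|")[1].strip(),
--                 "static": line.split("|")[2].strip(),
--             }
--         elif data_type == "edges" and __count == 4:
--             schema['edge_labels'][line.split("|")[0].strip()] = {
--                 "name": line.split("|")[0].strip(),
--                 "directed": line.split("|")[1].strip(),
--                 "unidirected": line.split("|")[2].strip(),
--                 "multiplicity": line.split("|")[3].strip(),
--             }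
--         elif data_type == "properties" and __count == 6:
--             schema['property_keys'][line.split("|")[0].strip()] = {
--                 "name": line.split("|")[0].strip(),
--                 "cardinality": line.split("|")[1].strip(),
--                 "type": extract_data_type(line),
--             }
--
--         if line.startswith("Vertex Label Name"):
--             data_type = "vertices"
--         elif line.startswith("Edge Label Name"):
--             data_type = "edges"
--         elif line.startswith("Property Key Name"):
--             data_type = "properties"
--     return schema
-- ===== SOURCE B (Python) =====
-- def _fields(line):
--     return [f.strip() for f in line.split("|")]
--
--
-- def process_graph_schema_string(schema_string):
--     schema = {"vertex_labels": {}, "edge_labels": {}, "property_keys": {}}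
--     if schema_string is None:
--         return schema
--     vertex_rows, edge_rows, property_rows = [], [], []
--     section, count = None, 0
--     for line in schema_string.split("\n"):
--         if line.startswith("-------"):
--             count += 1
--             continue
--         if section == "vertices" and count == 2:
--             vertex_rows.append(line)
--         elif section == "edges" and count == 4:
--             edge_rows.append(line)
--         elif section == "properties" and count == 6:
--             property_rows.append(line)
--         if line.startswith("Vertex Label Name"):
--             section = "vertices"
--         elif line.startswith("Edge Label Name"):
--             section = "edges"
--         elif line.startswith("Property Key Name"):
--             section = "properties"
--     for line in vertex_rows:
--         f = _fields(line)
--         schema["vertex_labels"][f[0]] = {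
--             "name": f[0], "partitioned": f[1], "static": f[2],
--         }
--     for line in edge_rows:
--         f = _fields(line)
--         schema["edge_labels"][f[0]] = {
--             "name": f[0], "directed": f[1], "unidirected": f[2],
--             "multiplicity": f[3],
--         }
--     for line in property_rows:
--         f = _fields(line)
--         if "class java.lang" in f[2]:
--             data_type = f[2].replace("class java.lang.", "")
--         else:
--             data_type = f[2].split(".")[-1]
--         schema["property_keys"][f[0]] = {
--             "name": f[0], "cardinality": f[1], "type": data_type,
--         }
--     return schema
-- ===== Notes on version B (the rewrite author's own statement) =====
-- stated objective: simpler
-- what changed: A parses rows inline inside one stateful loop over lines; B first partitions the lines into three row buckets with the same separator-count/header state machine, then builds each sub-dict in its own shaped pass over its bucket, splitting each row once into stripped fields. Pre_ excludes inputs on which A raises IndexError (a row inside an active section with too few '|' fields); B raises there too.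
import Mathlib
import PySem

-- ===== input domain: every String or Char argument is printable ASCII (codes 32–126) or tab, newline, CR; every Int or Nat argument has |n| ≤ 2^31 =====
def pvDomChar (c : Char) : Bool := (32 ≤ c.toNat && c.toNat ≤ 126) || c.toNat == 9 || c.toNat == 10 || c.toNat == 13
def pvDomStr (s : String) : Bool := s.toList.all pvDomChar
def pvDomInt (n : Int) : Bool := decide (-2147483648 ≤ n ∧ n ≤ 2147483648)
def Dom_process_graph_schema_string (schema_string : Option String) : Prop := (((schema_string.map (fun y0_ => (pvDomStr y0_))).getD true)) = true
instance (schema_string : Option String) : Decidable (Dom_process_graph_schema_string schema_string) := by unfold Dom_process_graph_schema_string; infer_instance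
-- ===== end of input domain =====

-- B replaces A's single parse-inline state loop by a partition-into-buckets pass plus three
-- shaped dict-building passes (objective: simpler).

-- ===== PORT A =====
-- s.split(sep) for a nonempty literal sep: split? is some there, the .getD [] default is unreachable
def pvSplit (s sep : String) : List String := (PySem.Str.split? s sep).getD []

-- line.split("|")[i].strip(); the .getD "" default is unreachable under Pre_ (index in range)
def pvFieldA (line : String) (i : Int) : String :=
  PySem.Str.strip ((PySem.List.pyGet? (pvSplit line "|") i).getD "")

def extract_data_type (_type : String) : String :=
  let _d := pvFieldA _type 2
  if PySem.Str.isIn "class java.lang" _d then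
    PySem.Str.replace _d "class java.lang." ""
  else
    -- split(".") is never empty, so [-1] always exists; .getD "" unreachable
    (PySem.List.pyGet? (pvSplit _d ".") (-1)).getD ""

-- the loop state: (vertex_labels, edge_labels, property_keys, data_type, __count)
def pvStepA
    (st : PySem.Dict String (List (String × String)) × PySem.Dict String (List (String × String)) ×
          PySem.Dict String (List (String × String)) × Option String × Int)
    (line : String) :
    PySem.Dict String (List (String × String)) × PySem.Dict String (List (String × String)) ×
    PySem.Dict String (List (String × String)) × Option String × Int :=
  match st with
  | (v, e, p, dt, c) =>
    if PySem.Str.startswith line "-------" then (v, e, p, dt, c + 1)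
    else
      let (v, e, p) :=
        if dt = some "vertices" ∧ c = 2 then
          (v.insert (pvFieldA line 0)
            [("name", pvFieldA line 0), ("partitioned", pvFieldA line 1), ("static", pvFieldA line 2)],
           e, p)
        else if dt = some "edges" ∧ c = 4 then
          (v, e.insert (pvFieldA line 0)
            [("name", pvFieldA line 0), ("directed", pvFieldA line 1),
             ("unidirected", pvFieldA line 2), ("multiplicity", pvFieldA line 3)],
           p)
        else if dt = some "properties" ∧ c = 6 then
          (v, e, p.insert (pvFieldA line 0)
            [("name", pvFieldA line 0), ("cardinality", pvFieldA line 1), ("type", extract_data_type line)])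
        else (v, e, p)
      let dt :=
        if PySem.Str.startswith line "Vertex Label Name" then some "vertices"
        else if PySem.Str.startswith line "Edge Label Name" then some "edges"
        else if PySem.Str.startswith line "Property Key Name" then some "properties"
        else dt
      (v, e, p, dt, c)

def process_graph_schema_string (schema_string : Option String) :
    List (String × List (String × List (String × String))) :=
  match schema_string with
  | none => [("vertex_labels", []), ("edge_labels", []), ("property_keys", [])]
  | some s =>
    match (pvSplit s "\n").foldl pvStepA
        (PySem.Dict.empty, PySem.Dict.empty, PySem.Dict.empty, none, 0) with
    | (v, e, p, _, _) =>
      [("vertex_labels", v.items), ("edge_labels", e.items), ("property_keys", p.items)]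

-- ===== PORT B =====
-- _fields: split on "|" and strip every field
def pvFieldsB (line : String) : List String :=
  (pvSplit line "|").map PySem.Str.strip

-- f[i]; the .getD "" default is unreachable under Pre_ (index in range)
def pvFget (f : List String) (i : Int) : String :=
  (PySem.List.pyGet? f i).getD ""

-- the partition pass: buckets the non-separator lines by the running (section, count) state
def pvStepPart
    (st : List String × List String × List String × Option String × Int) (line : String) :
    List String × List String × List String × Option String × Int :=
  match st with
  | (vr, er, pr, sec, c) =>
    if PySem.Str.startswith line "-------" then (vr, er, pr, sec, c + 1)
    else
      let (vr, er, pr) :=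
        if sec = some "vertices" ∧ c = 2 then (vr ++ [line], er, pr)
        else if sec = some "edges" ∧ c = 4 then (vr, er ++ [line], pr)
        else if sec = some "properties" ∧ c = 6 then (vr, er, pr ++ [line])
        else (vr, er, pr)
      let sec :=
        if PySem.Str.startswith line "Vertex Label Name" then some "vertices"
        else if PySem.Str.startswith line "Edge Label Name" then some "edges"
        else if PySem.Str.startswith line "Property Key Name" then some "properties"
        else sec
      (vr, er, pr, sec, c)

def pvBuildV (d : PySem.Dict String (List (String × String))) (line : String) :
    PySem.Dict String (List (String × String)) :=
  let f := pvFieldsB line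
  d.insert (pvFget f 0)
    [("name", pvFget f 0), ("partitioned", pvFget f 1), ("static", pvFget f 2)]

def pvBuildE (d : PySem.Dict String (List (String × String))) (line : String) :
    PySem.Dict String (List (String × String)) :=
  let f := pvFieldsB line
  d.insert (pvFget f 0)
    [("name", pvFget f 0), ("directed", pvFget f 1),
     ("unidirected", pvFget f 2), ("multiplicity", pvFget f 3)]

def pvBuildP (d : PySem.Dict String (List (String × String))) (line : String) :
    PySem.Dict String (List (String × String)) :=
  let f := pvFieldsB line
  let data_type :=
    if PySem.Str.isIn "class java.lang" (pvFget f 2) then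
      PySem.Str.replace (pvFget f 2) "class java.lang." ""
    else
      (PySem.List.pyGet? (pvSplit (pvFget f 2) ".") (-1)).getD ""
  d.insert (pvFget f 0)
    [("name", pvFget f 0), ("cardinality", pvFget f 1), ("type", data_type)]

def process_graph_schema_string_alt (schema_string : Option String) :
    List (String × List (String × List (String × String))) :=
  match schema_string with
  | none => [("vertex_labels", []), ("edge_labels", []), ("property_keys", [])]
  | some s =>
    match (pvSplit s "\n").foldl pvStepPart ([], [], [], none, 0) with
    | (vr, er, pr, _, _) =>
      [("vertex_labels", (vr.foldl pvBuildV PySem.Dict.empty).items),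
       ("edge_labels", (er.foldl pvBuildE PySem.Dict.empty).items),
       ("property_keys", (pr.foldl pvBuildP PySem.Dict.empty).items)]

-- ===== PRECONDITION & SPEC =====
-- Pre_ excludes exactly the inputs on which A raises IndexError: a non-separator line that lies in
-- an active section (the last section header seen before it, with the separator count at 2/4/6)
-- but has too few '|'-separated fields for that section's accesses. Stated in closed form per line:
-- the section of line i is the kind of the last header among the first i lines, its separator count
-- is the number of "-------" lines among the first i lines.
def pvIsSep (l : String) : Bool := PySem.Str.startswith l "-------"

def pvHeaderKind (l : String) : Option String :=
  if PySem.Str.startswith l "Vertex Label Name" then some "vertices"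
  else if PySem.Str.startswith l "Edge Label Name" then some "edges"
  else if PySem.Str.startswith l "Property Key Name" then some "properties"
  else none

def pvLines (schema_string : Option String) : List String :=
  match schema_string with
  | none => []
  | some s => pvSplit s "\n"

def pvRowOk (lines : List String) (i : Nat) : Prop :=
  pvIsSep (lines.getD i "") = false →
    ((((lines.take i).filterMap pvHeaderKind).getLast? = some "vertices" ∧
        (lines.take i).countP pvIsSep = 2) → 2 ≤ PySem.Str.count (lines.getD i "") "|") ∧
    ((((lines.take i).filterMap pvHeaderKind).getLast? = some "edges" ∧
        (lines.take i).countP pvIsSep = 4) → 3 ≤ PySem.Str.count (lines.getD i "") "|") ∧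
    ((((lines.take i).filterMap pvHeaderKind).getLast? = some "properties" ∧
        (lines.take i).countP pvIsSep = 6) → 2 ≤ PySem.Str.count (lines.getD i "") "|")

def Pre_process_graph_schema_string (schema_string : Option String) : Prop :=
  ∀ i < (pvLines schema_string).length, pvRowOk (pvLines schema_string) i

instance (schema_string : Option String) : Decidable (Pre_process_graph_schema_string schema_string) := by
  unfold Pre_process_graph_schema_string pvRowOk; infer_instance

def pvWitness_process_graph_schema_string : Option String :=
  some "-------\nVertex Label Name | Partitioned | Static\n-------\na | false | false"

def Spec_process_graph_schema_string (schema_string : Option String) (out : List (String × List (String × List (String × String)))) : Prop := out = process_graph_schema_string_alt schema_string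
instance (schema_string : Option String) (out : List (String × List (String × List (String × String)))) : Decidable (Spec_process_graph_schema_string schema_string out) := by unfold Spec_process_graph_schema_string; infer_instance

-- ===== CLAIM (what is proved, stated in full; the proofs are below) =====
def Claim_equal_process_graph_schema_string : Prop := ∀ (schema_string : Option String), Dom_process_graph_schema_string schema_string → Pre_process_graph_schema_string schema_string → Spec_process_graph_schema_string schema_string (process_graph_schema_string schema_string)

-- ===== LEMMAS AND PROOFS =====

-- A's field extraction equals B's: indexing the stripped fields = stripping the indexed field
theorem pvField_eq (line : String) (i : Int) : pvFget (pvFieldsB line) i = pvFieldA line i := by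
  unfold pvFget pvFieldsB pvFieldA
  have hmap : PySem.List.pyGet? ((pvSplit line "|").map PySem.Str.strip) i
      = (PySem.List.pyGet? (pvSplit line "|") i).map PySem.Str.strip := by
    simp [PySem.List.pyGet?, PySem.List.pyIdx?]
  rw [hmap]
  rcases PySem.List.pyGet? (pvSplit line "|") i with _ | x
  · decide
  · rfl

theorem pvBuildV_eq_stepA (d : PySem.Dict String (List (String × String))) (line : String) :
    pvBuildV d line =
      d.insert (pvFieldA line 0)
        [("name", pvFieldA line 0), ("partitioned", pvFieldA line 1), ("static", pvFieldA line 2)] := by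
  simp [pvBuildV, pvField_eq]

theorem pvBuildE_eq_stepA (d : PySem.Dict String (List (String × String))) (line : String) :
    pvBuildE d line =
      d.insert (pvFieldA line 0)
        [("name", pvFieldA line 0), ("directed", pvFieldA line 1),
         ("unidirected", pvFieldA line 2), ("multiplicity", pvFieldA line 3)] := by
  simp [pvBuildE, pvField_eq]

theorem pvBuildP_eq_stepA (d : PySem.Dict String (List (String × String))) (line : String) :
    pvBuildP d line =
      d.insert (pvFieldA line 0)
        [("name", pvFieldA line 0), ("cardinality", pvFieldA line 1), ("type", extract_data_type line)] := by
  simp only [pvBuildP, extract_data_type, pvField_eq]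

-- abstraction: B's partition state determines A's dict state (dicts = folds over the buckets)
def pvAbs (st : List String × List String × List String × Option String × Int) :
    PySem.Dict String (List (String × String)) × PySem.Dict String (List (String × String)) ×
    PySem.Dict String (List (String × String)) × Option String × Int :=
  match st with
  | (vr, er, pr, sec, c) =>
    (vr.foldl pvBuildV PySem.Dict.empty, er.foldl pvBuildE PySem.Dict.empty,
     pr.foldl pvBuildP PySem.Dict.empty, sec, c)

theorem pvStep_comm (st : List String × List String × List String × Option String × Int)
    (line : String) : pvStepA (pvAbs st) line = pvAbs (pvStepPart st line) := by
  obtain ⟨vr, er, pr, sec, c⟩ := st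
  simp only [pvStepA, pvStepPart, pvAbs]
  by_cases hsep : PySem.Str.startswith line "-------" = true
  · rw [if_pos hsep, if_pos hsep]
  · rw [if_neg hsep, if_neg hsep]
    by_cases h1 : sec = some "vertices" ∧ c = 2
    · rw [if_pos h1]
      simp [pvBuildV_eq_stepA, h1]
    · rw [if_neg h1]
      by_cases h2 : sec = some "edges" ∧ c = 4
      · rw [if_pos h2]
        simp [pvBuildE_eq_stepA, h2]
      · rw [if_neg h2]
        by_cases h3 : sec = some "properties" ∧ c = 6
        · rw [if_pos h3]
          simp [pvBuildP_eq_stepA, h3]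
        · rw [if_neg h3]
          simp [h1, h2, h3]

theorem pv_loop_eq (lines : List String) :
    ∀ st, lines.foldl pvStepA (pvAbs st) = pvAbs (lines.foldl pvStepPart st) := by
  induction lines with
  | nil => intro st; rfl
  | cons line rest ih =>
    intro st
    rw [List.foldl_cons, List.foldl_cons, pvStep_comm]
    exact ih _

-- ===== VERDICT (by name: the statement is the Claim_ definition above) =====
theorem process_graph_schema_string_spec : Claim_equal_process_graph_schema_string := by
  intro schema_string _ _
  unfold Spec_process_graph_schema_string
  rcases schema_string with _ | s
  · rfl
  · have h := pv_loop_eq (pvSplit s "\n") ([], [], [], none, 0)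
    rcases hp : (pvSplit s "\n").foldl pvStepPart ([], [], [], none, 0) with ⟨vr, er, pr, sec, c⟩
    rw [hp] at h
    simp only [pvAbs, List.foldl_nil] at h
    simp only [process_graph_schema_string, process_graph_schema_string_alt]
    rw [h, hp]
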